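-- pv_equiv track=rewrite | github.com/ClementChambard/TouhouInterpreter | thi/codeUtil.py | formatBloc
-- ===== SOURCE A (Python) =====
-- def formatBloc(bloc: str, indent: int, startlevel: int) -> str:
--     indentlevel = startlevel
--     lines = [line.strip() for line in bloc.split("\n")]
--     newlines = []
--     nextIsIndented = False
--     inquote = ""
--     for line in lines:
--         if line == "":
--             continue
--         modifier = 0
--         if line.startswith("}") or line.startswith(")") or line.startswith("]"):
--             modifier = -1
--         if nextIsIndented:
--             modifier += 1
--             nextIsIndented = False
--         if (
--             line.startswith("if")
--             or line.startswith("while")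
--             or line.startswith("else")
--             or line.startswith("for")
--         ) and line.endswith(")"):
--             nextIsIndented = True
--         newlines.append((indentlevel + modifier) * indent * " " + line)
--         for c in line:
--             if c in "([{" and inquote == "":
--                 indentlevel += 1
--             elif c in "}])" and inquote == "":
--                 indentlevel -= 1
--             elif c == inquote:
--                 inquote = ""
--             elif c in "\"'":
--                 inquote = c
--
--     return "\n".join(newlines) + "\n"
-- ===== SOURCE B (Python) =====
-- def _qstep(q, c):
--     """Pure quote-state automaton: brackets never change it, a quote char toggles it."""
--     return "" if c == q else (c if c in "\"'" else q)
--
--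
-- def _entryQuotes(lines):
--     """Quote state at the start of each line (stage 1)."""
--     qs, q = [], ""
--     for line in lines:
--         qs.append(q)
--         for c in line:
--             q = _qstep(q, c)
--     return qs
--
--
-- def _delta(line, q):
--     """Net bracket balance of one line, given its entry quote state (stage 2)."""
--     d = 0
--     for c in line:
--         if q == "" and c in "([{":
--             d += 1
--         elif q == "" and c in ")]}":
--             d -= 1
--         q = _qstep(q, c)
--     return d
--
--
-- def _levels(start, deltas):
--     """Entry indent level of each line = start + prefix sums of deltas (stage 3)."""
--     lv, cur = [], start
--     for d in deltas:
--         lv.append(cur)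
--         cur += d
--     return lv
--
--
-- def _opensBlock(line):
--     return line.startswith(("if", "while", "else", "for")) and line.endswith(")")
--
--
-- def formatBloc(bloc: str, indent: int, startlevel: int) -> str:
--     lines = [s for s in map(str.strip, bloc.split("\n")) if s]
--     qs = _entryQuotes(lines)
--     deltas = [_delta(l, q) for l, q in zip(lines, qs)]
--     levels = _levels(startlevel, deltas)
--     kws = [False] + [_opensBlock(l) for l in lines[:-1]]
--     out = [(lv + kw - (l[0] in ")]}")) * indent * " " + l
--            for l, lv, kw in zip(lines, levels, kws)]
--     return "\n".join(out) + "\n"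
-- ===== Notes on version B (the rewrite author's own statement) =====
-- stated objective: alternative
-- what changed: B replaces A's single loop threading four mutable variables (newlines, nextIsIndented, inquote, indentlevel) with a staged pipeline of independent sequences: filter the non-empty stripped lines, compute each line's entry quote state with a pure quote automaton, compute each line's bracket delta independently from its entry quote, obtain entry levels as prefix sums of the deltas, shift the keyword flags by one line, and finally zip-render; …
import Mathlib
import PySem

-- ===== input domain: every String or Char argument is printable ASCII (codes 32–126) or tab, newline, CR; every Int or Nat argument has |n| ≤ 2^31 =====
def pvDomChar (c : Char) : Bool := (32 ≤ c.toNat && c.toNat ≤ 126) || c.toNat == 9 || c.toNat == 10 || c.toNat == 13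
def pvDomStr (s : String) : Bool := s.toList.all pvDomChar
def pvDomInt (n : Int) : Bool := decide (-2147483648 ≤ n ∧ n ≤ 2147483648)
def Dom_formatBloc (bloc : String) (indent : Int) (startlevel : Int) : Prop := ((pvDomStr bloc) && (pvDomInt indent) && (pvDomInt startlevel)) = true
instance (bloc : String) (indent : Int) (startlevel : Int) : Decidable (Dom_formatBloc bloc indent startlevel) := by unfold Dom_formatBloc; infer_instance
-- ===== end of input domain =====

-- B replaces A's single four-variable state-machine loop by a staged pipeline of independent
-- per-line sequences (entry quote states, bracket deltas, prefix-sum levels, shifted keyword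
-- flags) combined by a final zip-render; objective: alternative decomposition, same cost.

-- ===== PORT A =====
-- A's inner character loop; inquote : Option Char models Python's "" / one-char string
def pvChA (st : Int × Option Char) (c : Char) : Int × Option Char :=
  if ['(', '[', '{'].contains c && st.2 == none then (st.1 + 1, st.2)
  else if ['}', ']', ')'].contains c && st.2 == none then (st.1 - 1, st.2)
  else if some c == st.2 then (st.1, none)
  else if ['"', '\''].contains c then (st.1, some c)
  else st

-- A's 'if/while/else/for … endswith(")")' test, the or-chain as written
def pvKwA (line : List Char) : Bool :=
  (PySem.Chars.startswith line "if".toList || PySem.Chars.startswith line "while".toList ||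
   PySem.Chars.startswith line "else".toList || PySem.Chars.startswith line "for".toList) &&
  PySem.Chars.endswith line [')']

-- A's loop body; state = (newlines, nextIsIndented, inquote, indentlevel)
def pvLineA (indent : Int) (st : List (List Char) × Bool × Option Char × Int) (line : List Char) :
    List (List Char) × Bool × Option Char × Int :=
  if line = [] then st else
  let m0 : Int := if PySem.Chars.startswith line ['}'] || PySem.Chars.startswith line [')'] ||
                     PySem.Chars.startswith line [']'] then -1 else 0
  let m : Int := if st.2.1 then m0 + 1 else m0
  let r := line.foldl pvChA (st.2.2.2, st.2.2.1)
  (st.1 ++ [PySem.List.pyRepeat [' '] ((st.2.2.2 + m) * indent) ++ line], pvKwA line, r.2, r.1)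

def formatBloc (bloc : String) (indent : Int) (startlevel : Int) : String :=
  let lines := (PySem.Chars.splitOn bloc.toList ['\n']).map PySem.Chars.strip
  let r := lines.foldl (pvLineA indent) ([], false, none, startlevel)
  String.ofList (PySem.Chars.join ['\n'] r.1 ++ ['\n'])

-- ===== PORT B =====
-- _qstep: pure quote automaton (brackets never change it, a quote char toggles it)
def bQstep (q : Option Char) (c : Char) : Option Char :=
  if some c == q then none else if ['"', '\''].contains c then some c else q

-- _entryQuotes: quote state at the start of each line (stage 1)
def bEntryQuotes (lines : List (List Char)) : List (Option Char) :=
  (lines.foldl (fun st line => (st.1 ++ [st.2], line.foldl bQstep st.2)) ([], none)).1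

def bClose (c : Char) : Bool := [')', ']', '}'].contains c

-- _delta: net bracket balance of one line given its entry quote state (stage 2)
def bStep (st : Int × Option Char) (c : Char) : Int × Option Char :=
  (if st.2 == none && ['(', '[', '{'].contains c then st.1 + 1
   else if st.2 == none && bClose c then st.1 - 1
   else st.1, bQstep st.2 c)

def bDelta (line : List Char) (q0 : Option Char) : Int :=
  (line.foldl bStep ((0 : Int), q0)).1

-- _levels: entry level of each line = start + prefix sums of the deltas (stage 3)
def bLevels (start : Int) (deltas : List Int) : List Int :=
  (deltas.foldl (fun st d => (st.1 ++ [st.2], st.2 + d)) (([] : List Int), start)).1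

-- _opensBlock: startswith-tuple + endswith test
def bKw (line : List Char) : Bool :=
  (["if", "while", "else", "for"].any fun p => PySem.Chars.startswith line p.toList) &&
  PySem.Chars.endswith line [')']

def formatBloc_alt (bloc : String) (indent : Int) (startlevel : Int) : String :=
  let lines := ((PySem.Chars.splitOn bloc.toList ['\n']).map PySem.Chars.strip).filter (· ≠ [])
  let qs := bEntryQuotes lines
  let deltas := (lines.zip qs).map fun p => bDelta p.1 p.2
  let levels := bLevels startlevel deltas
  let kws := false :: lines.dropLast.map bKw
  let out := (lines.zip (levels.zip kws)).map fun t =>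
    PySem.List.pyRepeat [' ']
      ((t.2.1 + (if t.2.2 then 1 else 0) -
        (if (match t.1 with | [] => false | c :: _ => bClose c) then 1 else 0)) * indent) ++ t.1
  String.ofList (PySem.Chars.join ['\n'] out ++ ['\n'])

-- ===== PRECONDITION & SPEC =====
def Spec_formatBloc (bloc : String) (indent : Int) (startlevel : Int) (out : String) : Prop := out = formatBloc_alt bloc indent startlevel
instance (bloc : String) (indent : Int) (startlevel : Int) (out : String) : Decidable (Spec_formatBloc bloc indent startlevel out) := by unfold Spec_formatBloc; infer_instance

-- ===== CLAIM (what is proved, stated in full; the proofs are below) =====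
def Claim_equal_formatBloc : Prop := ∀ (bloc : String) (indent : Int) (startlevel : Int), Dom_formatBloc bloc indent startlevel → Spec_formatBloc bloc indent startlevel (formatBloc bloc indent startlevel)

-- ===== LEMMAS AND PROOFS =====

-- the quote line step and formatting helper used by the intermediate spec
def pvQline (q : Option Char) (l : List Char) : Option Char := l.foldl bQstep q

def pvRend (indent lvl : Int) (next : Bool) (l : List Char) : List Char :=
  PySem.List.pyRepeat [' ']
    ((lvl + (if next then 1 else 0) -
      (if (match l with | [] => false | c :: _ => bClose c) then 1 else 0)) * indent) ++ l

-- intermediate spec: the rendered output of both programs, by structural recursion on the lines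
def pvOutSpec (indent : Int) : Int → Bool → Option Char → List (List Char) → List (List Char)
  | _, _, _, [] => []
  | lvl, next, q, l :: ls =>
      pvRend indent lvl next l :: pvOutSpec indent (lvl + bDelta l q) (bKw l) (pvQline q l) ls

-- A's per-character step is exactly B's (delta step, quote step), for every quote state
theorem pvChA_eq_bStep : pvChA = bStep := by
  funext st c
  obtain ⟨lvl, q⟩ := st
  simp only [pvChA, bStep, bQstep, bClose]
  split_ifs <;> simp_all <;> rcases ‹_ ∨ _› with rfl | rfl <;> simp_all

theorem bStep_shift (d : Int) (q : Option Char) (c : Char) :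
    bStep (d, q) c = (d + (bStep (0, q) c).1, bQstep q c) := by
  simp only [bStep]
  split_ifs <;> simp <;> omega

theorem bStep_fold (cs : List Char) : ∀ (d : Int) (q : Option Char),
    cs.foldl bStep (d, q) = (d + bDelta cs q, pvQline q cs) := by
  induction cs with
  | nil => intro d q; simp [bDelta, pvQline]
  | cons c cs ih =>
    intro d q
    rw [List.foldl_cons, bStep_shift]
    rw [ih]
    have h2 : bDelta (c :: cs) q = (bStep (0, q) c).1 + bDelta cs (bQstep q c) := by
      unfold bDelta
      rw [List.foldl_cons, show bStep ((0 : Int), q) c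
            = ((bStep ((0 : Int), q) c).1, bQstep q c) from rfl,
          ih (bStep ((0 : Int), q) c).1 (bQstep q c), ih (0 : Int) (bQstep q c)]
      simp
    rw [h2]
    simp only [Prod.mk.injEq]
    exact ⟨by omega, rfl⟩

theorem pvKw_eq (line : List Char) : pvKwA line = bKw line := by
  simp [pvKwA, bKw, List.any, Bool.or_assoc]

theorem pvHead_close (c : Char) (rest : List Char) :
    (PySem.Chars.startswith (c :: rest) ['}'] || PySem.Chars.startswith (c :: rest) [')'] ||
     PySem.Chars.startswith (c :: rest) [']']) = bClose c := by
  simp only [PySem.Chars.startswith, bClose, List.isPrefixOf]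
  simp [BEq.comm, Bool.or_comm, Bool.or_left_comm, Bool.beq_eq_decide_eq]

-- A's loop body on a non-empty line
theorem pvLineA_eq (indent : Int) (out : List (List Char)) (next : Bool) (q : Option Char)
    (lvl : Int) (l : List Char) (hl : l ≠ []) :
    pvLineA indent (out, next, q, lvl) l =
      (out ++ [pvRend indent lvl next l], bKw l, pvQline q l, lvl + bDelta l q) := by
  obtain ⟨c, rest, rfl⟩ : ∃ c rest, l = c :: rest := by
    cases l with | nil => exact absurd rfl hl | cons c rest => exact ⟨c, rest, rfl⟩
  unfold pvLineA
  rw [if_neg (List.cons_ne_nil c rest)]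
  simp only [pvChA_eq_bStep, bStep_fold, pvKw_eq, pvHead_close, pvRend]
  have : (lvl + if next = true then (if bClose c = true then -1 else 0) + 1
            else if bClose c = true then -1 else 0)
      = lvl + (if next = true then 1 else 0) - (if bClose c = true then 1 else 0) := by
    split_ifs <;> omega
  simp only [this]

-- A's whole loop, against the intermediate spec
theorem pvFoldA_eq (indent : Int) (ls : List (List Char)) :
    ∀ (out : List (List Char)) (next : Bool) (q : Option Char) (lvl : Int),
    (∀ l ∈ ls, l ≠ []) →
    (ls.foldl (pvLineA indent) (out, next, q, lvl)).1 = out ++ pvOutSpec indent lvl next q ls := by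
  induction ls with
  | nil => intro out next q lvl _; simp [pvOutSpec]
  | cons l ls ih =>
    intro out next q lvl h
    have hl : l ≠ [] := h l (List.mem_cons_self)
    rw [List.foldl_cons, pvLineA_eq indent out next q lvl l hl]
    rw [ih _ _ _ _ (fun x hx => h x (List.mem_cons_of_mem _ hx))]
    simp [pvOutSpec]

-- skipping empty lines: A's fold over all stripped lines = fold over the non-empty ones
theorem pvFoldA_filter (indent : Int) (ls : List (List Char)) :
    ∀ st, ls.foldl (pvLineA indent) st = (ls.filter (· ≠ [])).foldl (pvLineA indent) st := by
  induction ls with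
  | nil => intro st; rfl
  | cons l ls ih =>
    intro st
    by_cases hl : l = []
    · subst hl
      rw [List.foldl_cons, show pvLineA indent st [] = st from by simp [pvLineA]]
      rw [show List.filter (· ≠ []) ([] :: ls) = List.filter (· ≠ []) ls from by simp]
      exact ih st
    · rw [List.foldl_cons,
        show List.filter (· ≠ []) (l :: ls) = l :: List.filter (· ≠ []) ls from by
          simp [hl],
        List.foldl_cons]
      exact ih _

-- the entry-quote stage, named step and accumulator laws
def pvEQstep (st : List (Option Char) × Option Char) (line : List Char) :
    List (Option Char) × Option Char := (st.1 ++ [st.2], line.foldl bQstep st.2)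

theorem pvEQ_acc (lines : List (List Char)) : ∀ (acc : List (Option Char)) (q : Option Char),
    (lines.foldl pvEQstep (acc, q)).1 = acc ++ (lines.foldl pvEQstep ([], q)).1 := by
  induction lines with
  | nil => intro acc q; simp
  | cons l ls ih =>
    intro acc q
    simp only [List.foldl_cons, pvEQstep, List.nil_append]
    rw [ih, ih [q]]
    simp

theorem bEntryQuotes_cons (l : List Char) (ls : List (List Char)) :
    ∀ (q : Option Char),
    ((l :: ls).foldl pvEQstep ([], q)).1 = q :: (ls.foldl pvEQstep ([], pvQline q l)).1 := by
  intro q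
  simp only [List.foldl_cons, pvEQstep, List.nil_append]
  rw [pvEQ_acc]
  rfl

-- the levels stage, named step and accumulator laws
def pvLvlStep (st : List Int × Int) (d : Int) : List Int × Int := (st.1 ++ [st.2], st.2 + d)

theorem pvLvl_acc (ds : List Int) : ∀ (acc : List Int) (cur : Int),
    (ds.foldl pvLvlStep (acc, cur)).1 = acc ++ (ds.foldl pvLvlStep ([], cur)).1 := by
  induction ds with
  | nil => intro acc cur; simp
  | cons d ds ih =>
    intro acc cur
    simp only [List.foldl_cons, pvLvlStep, List.nil_append]
    rw [ih, ih [cur]]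
    simp

theorem bLevels_cons (cur d : Int) (ds : List Int) :
    bLevels cur (d :: ds) = cur :: bLevels (cur + d) ds := by
  unfold bLevels
  rw [show ((d :: ds).foldl (fun st d => (st.1 ++ [st.2], st.2 + d)) (([] : List Int), cur))
        = (d :: ds).foldl pvLvlStep ([], cur) from rfl,
      show (ds.foldl (fun st d => (st.1 ++ [st.2], st.2 + d)) (([] : List Int), cur + d))
        = ds.foldl pvLvlStep ([], cur + d) from rfl]
  simp only [List.foldl_cons, pvLvlStep, List.nil_append]
  rw [pvLvl_acc]
  rfl

-- B's zip-render pipeline, against the intermediate spec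
theorem pvZipB_eq (indent : Int) (ls : List (List Char)) :
    ∀ (lvl : Int) (next : Bool) (q : Option Char),
    ((ls.zip ((bLevels lvl ((ls.zip ((ls.foldl pvEQstep ([], q)).1)).map
        fun p => bDelta p.1 p.2)).zip (next :: ls.dropLast.map bKw))).map fun t =>
      PySem.List.pyRepeat [' ']
        ((t.2.1 + (if t.2.2 then 1 else 0) -
          (if (match t.1 with | [] => false | c :: _ => bClose c) then 1 else 0)) * indent) ++ t.1)
      = pvOutSpec indent lvl next q ls := by
  induction ls with
  | nil => intro lvl next q; simp [pvOutSpec]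
  | cons l ls ih =>
    intro lvl next q
    rw [bEntryQuotes_cons]
    simp only [List.zip_cons_cons, List.map_cons, bLevels_cons]
    cases ls with
    | nil => simp [pvOutSpec, pvRend]
    | cons l' ls' =>
      rw [show (l :: l' :: ls').dropLast = l :: (l' :: ls').dropLast by simp]
      simp only [List.map_cons]
      rw [pvOutSpec]
      refine congrArg₂ _ rfl ?_
      exact ih (lvl + bDelta l q) (bKw l) (pvQline q l)

-- ===== VERDICT (by name: the statement is the Claim_ definition above) =====
theorem formatBloc_spec : Claim_equal_formatBloc := by
  intro bloc indent startlevel _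
  unfold Spec_formatBloc formatBloc formatBloc_alt
  dsimp only
  rw [pvFoldA_filter]
  rw [pvFoldA_eq indent _ [] false none startlevel
    (by intro l hl; simpa using (List.mem_filter.mp hl).2)]
  rw [show bEntryQuotes
        (((PySem.Chars.splitOn bloc.toList ['\n']).map PySem.Chars.strip).filter (· ≠ []))
      = ((((PySem.Chars.splitOn bloc.toList ['\n']).map PySem.Chars.strip).filter
          (· ≠ [])).foldl pvEQstep ([], none)).1 from rfl]
  rw [pvZipB_eq]
  rfl
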